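-- pv_equiv track=rewrite | github.com/chalwidz/LTLIntersectionOfTraces | materialisation.py | shortest_representation
-- ===== SOURCE A (Python) =====
-- def shortest_representation(my_trace, my_period):
--     representation = {timepoint: [] for timepoint in range(my_period[1] + 1)}
--     g_list = []
--     for timepoint in representation:
--         if timepoint in my_trace:
--             for atom in my_trace[timepoint]:
--                 if "G" not in atom:
--                     representation[timepoint].append(atom)
--                 else:
--                     representation[timepoint].append(atom.strip("G"))
--                     g_list.append(atom)
--             for atom in g_list:
--                 if atom.strip("G") not in representation[timepoint]:
--                     representation[timepoint].append(atom.strip("G"))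
--     offset = {timepoint: representation[timepoint] for timepoint in representation if timepoint < my_period[0]}
--     period = {timepoint: representation[timepoint] for timepoint in representation if timepoint >= my_period[0]}
--     return {"offset": offset, "period": period}
-- ===== SOURCE B (Python) =====
-- def shortest_representation(my_trace, my_period):
--     # first pass: base rows + first-appearance dict of stripped G-atoms
--     base = {}
--     first = {}
--     for t in range(my_period[1] + 1):
--         if t in my_trace:
--             base[t] = [a.strip("G") if "G" in a else a for a in my_trace[t]]
--             for a in my_trace[t]:
--                 if "G" in a:
--                     s = a.strip("G")
--                     if s not in first:
--                         first[s] = t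
--         else:
--             base[t] = []
--     # second pass: propagate G-atoms first seen at or before each in-trace timepoint
--     result = {}
--     for t, row in base.items():
--         if t in my_trace:
--             result[t] = row + [s for s, ft in first.items() if ft <= t and s not in row]
--         else:
--             result[t] = row
--     offset = {t: v for t, v in result.items() if t < my_period[0]}
--     period = {t: v for t, v in result.items() if t >= my_period[0]}
--     return {"offset": offset, "period": period}
-- ===== Notes on version B (the rewrite author's own statement) =====
-- stated objective: alternative
-- what changed: B replaces A's single pass with a growing raw g_list re-scanned (with dedup membership tests) at every in-trace timepoint by two passes: one pass builds the base rows and a first-appearance dict from stripped G-atom to its earliest in-trace timepoint, and a second pass extends each in-trace row by filtering that dict on first-appearance <= t and absence from the row.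
import Mathlib
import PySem

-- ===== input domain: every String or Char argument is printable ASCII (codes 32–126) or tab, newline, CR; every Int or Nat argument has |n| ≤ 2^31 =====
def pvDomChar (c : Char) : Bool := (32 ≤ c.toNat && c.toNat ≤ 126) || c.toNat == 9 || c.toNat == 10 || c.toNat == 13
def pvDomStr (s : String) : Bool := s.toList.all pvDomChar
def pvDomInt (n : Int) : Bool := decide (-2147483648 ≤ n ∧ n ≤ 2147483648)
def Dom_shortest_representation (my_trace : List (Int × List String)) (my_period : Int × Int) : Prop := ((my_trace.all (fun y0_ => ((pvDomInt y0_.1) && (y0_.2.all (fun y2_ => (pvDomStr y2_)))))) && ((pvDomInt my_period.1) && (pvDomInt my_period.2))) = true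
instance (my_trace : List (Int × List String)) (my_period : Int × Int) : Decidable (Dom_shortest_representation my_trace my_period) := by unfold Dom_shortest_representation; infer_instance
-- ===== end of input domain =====

-- B builds the propagated G-atoms from a precomputed first-appearance index in a second pass
-- instead of re-scanning A's growing raw g_list at every in-trace timepoint (alternative decomposition).

-- ===== PORT A =====
def shortest_representation (my_trace : List (Int × List String)) (my_period : Int × Int) : List (String × List (Int × List String)) :=
  let tr : PySem.Dict Int (List String) := PySem.Dict.mk my_trace
  let representation : PySem.Dict Int (List String) :=
    (PySem.List.pyRange 0 (my_period.2 + 1) 1).foldl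
      (fun d timepoint => d.insert timepoint []) PySem.Dict.empty
  let final :=
    representation.keys.foldl
      (fun (st : PySem.Dict Int (List String) × List String) timepoint =>
        if tr.contains timepoint then
          let st1 := ((tr.get? timepoint).getD []).foldl
            (fun (st : PySem.Dict Int (List String) × List String) atom =>
              if !(PySem.Str.isIn "G" atom) then
                (st.1.modify timepoint [] (fun row => row ++ [atom]), st.2)
              else
                (st.1.modify timepoint [] (fun row => row ++ [PySem.Str.stripChars atom "G"]),
                 st.2 ++ [atom])) st
          let rep2 := st1.2.foldl
            (fun rep atom =>
              if (rep.getD timepoint []).contains (PySem.Str.stripChars atom "G") then rep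
              else rep.modify timepoint [] (fun row => row ++ [PySem.Str.stripChars atom "G"]))
            st1.1
          (rep2, st1.2)
        else st)
      (representation, ([] : List String))
  let offset := final.1.items.filter (fun kv => kv.1 < my_period.1)
  let period := final.1.items.filter (fun kv => decide (my_period.1 ≤ kv.1))
  [("offset", offset), ("period", period)]

-- ===== PORT B =====
def shortest_representation_alt (my_trace : List (Int × List String)) (my_period : Int × Int) : List (String × List (Int × List String)) :=
  let tr : PySem.Dict Int (List String) := PySem.Dict.mk my_trace
  -- first pass: base rows + first-appearance dict of stripped G-atoms
  let bf :=
    (PySem.List.pyRange 0 (my_period.2 + 1) 1).foldl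
      (fun (bf : PySem.Dict Int (List String) × PySem.Dict String Int) t =>
        if tr.contains t then
          let row := ((tr.get? t).getD []).map
            (fun a => if PySem.Str.isIn "G" a then PySem.Str.stripChars a "G" else a)
          let first := ((tr.get? t).getD []).foldl
            (fun f a =>
              if PySem.Str.isIn "G" a then
                if f.contains (PySem.Str.stripChars a "G") then f
                else f.insert (PySem.Str.stripChars a "G") t
              else f) bf.2
          (bf.1.insert t row, first)
        else (bf.1.insert t [], bf.2))
      (PySem.Dict.empty, PySem.Dict.empty)
  let first := bf.2
  -- second pass: propagate G-atoms first seen at or before each in-trace timepoint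
  let result := bf.1.items.foldl
    (fun (res : PySem.Dict Int (List String)) p =>
      if tr.contains p.1 then
        res.insert p.1
          (p.2 ++ (first.items.filter
            (fun q => decide (q.2 ≤ p.1) && !(p.2.contains q.1))).map (fun q => q.1))
      else res.insert p.1 p.2)
    PySem.Dict.empty
  let offset := result.items.filter (fun kv => kv.1 < my_period.1)
  let period := result.items.filter (fun kv => decide (my_period.1 ≤ kv.1))
  [("offset", offset), ("period", period)]

-- ===== PRECONDITION & SPEC =====
def Spec_shortest_representation (my_trace : List (Int × List String)) (my_period : Int × Int) (out : List (String × List (Int × List String))) : Prop := out = shortest_representation_alt my_trace my_period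
instance (my_trace : List (Int × List String)) (my_period : Int × Int) (out : List (String × List (Int × List String))) : Decidable (Spec_shortest_representation my_trace my_period out) := by unfold Spec_shortest_representation; infer_instance

-- ===== CLAIM (what is proved, stated in full; the proofs are below) =====
def Claim_equal_shortest_representation : Prop := ∀ (my_trace : List (Int × List String)) (my_period : Int × Int), Dom_shortest_representation my_trace my_period → Spec_shortest_representation my_trace my_period (shortest_representation my_trace my_period)

-- ===== LEMMAS AND PROOFS =====

-- abbreviations for the shared vocabulary of both ports
def hgB (a : String) : Bool := PySem.Str.isIn "G" a
def sgS (a : String) : String := PySem.Str.stripChars a "G"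
def ownify (a : String) : String := if hgB a then sgS a else a
def atomsOf (tr : List (Int × List String)) (t : Int) : List String :=
  ((PySem.Dict.mk tr).get? t).getD []
def inTr (tr : List (Int × List String)) (t : Int) : Bool := (PySem.Dict.mk tr).contains t
def ownRow (tr : List (Int × List String)) (t : Int) : List String := (atomsOf tr t).map ownify
-- dedup-append of the stripped forms of a raw G-atom list onto sn
def addStrips (sn : List String) (σ : List String) : List String :=
  σ.foldl (fun sn a => if sn.contains (sgS a) then sn else sn ++ [sgS a]) sn
-- same, but over a full atom list, considering only G-atoms
def addStripsAll (sn : List String) (xs : List String) : List String :=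
  xs.foldl (fun sn a => if hgB a then (if sn.contains (sgS a) then sn else sn ++ [sgS a]) else sn) sn
-- canonical rows of the representation, scanning timepoints with the set sn of stripped G-atoms seen so far
def canon (tr : List (Int × List String)) : List String → List Int → List (Int × List String)
  | _, [] => []
  | sn, t :: ts =>
    if inTr tr t then
      (t, ownRow tr t ++ (addStripsAll sn (atomsOf tr t)).filter
            (fun s => !((ownRow tr t).contains s)))
        :: canon tr (addStripsAll sn (atomsOf tr t)) ts
    else (t, []) :: canon tr sn ts

-- ---- generic Dict facts ----
theorem dict_contains_eq_keys (l : List (Int × List String)) (k : Int) :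
    (PySem.Dict.mk l).contains k = (l.map Prod.fst).contains k := by
  simp [PySem.Dict.contains, List.any_eq, List.contains_eq_mem]
theorem dict_getD_split (done rest : List (Int × List String)) (t : Int) (row : List String)
    (h : ∀ p ∈ done, p.1 ≠ t) :
    (PySem.Dict.mk (done ++ (t, row) :: rest)).getD t [] = row := by
  induction done with
  | nil => simp [PySem.Dict.getD, PySem.Dict.get?]
  | cons p d ih =>
    have hp : (p.1 == t) = false := by simpa using h p (by simp)
    simp only [List.cons_append, PySem.Dict.getD, PySem.Dict.get?, List.find?_cons, hp] at *
    exact ih (fun q hq => h q (by simp [hq]))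
theorem dict_modify_split (done rest : List (Int × List String)) (t : Int) (row : List String)
    (f : List String → List String)
    (h : ∀ p ∈ done, p.1 ≠ t) (h' : ∀ p ∈ rest, p.1 ≠ t) :
    (PySem.Dict.mk (done ++ (t, row) :: rest)).modify t [] f
      = PySem.Dict.mk (done ++ (t, f row) :: rest) := by
  rw [PySem.Dict.modify, dict_getD_split done rest t row h]
  have hc : (PySem.Dict.mk (done ++ (t, row) :: rest)).contains t = true := by
    rw [dict_contains_eq_keys]; simp
  rw [PySem.Dict.insert, if_pos hc]
  congr 1
  simp only [List.map_append, List.map_cons, beq_self_eq_true, if_pos]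
  have h1 : ∀ p ∈ done, (if (p.1 == t) = true then (t, f row) else p) = id p :=
    fun p hp => if_neg (by simpa using h p hp)
  have h2 : ∀ p ∈ rest, (if (p.1 == t) = true then (t, f row) else p) = id p :=
    fun p hp => if_neg (by simpa using h' p hp)
  rw [(List.map_congr_left h1).trans (List.map_id _), (List.map_congr_left h2).trans (List.map_id _)]

theorem dict_insert_fresh {κ ν : Type} [BEq κ] (l : List (κ × ν)) (t : κ) (v : ν)
    (h : (PySem.Dict.mk l).contains t = false) :
    (PySem.Dict.mk l).insert t v = PySem.Dict.mk (l ++ [(t, v)]) := by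
  simp [PySem.Dict.insert, h]

-- ---- shared small lemmas ----
theorem addStrips_filter (sn : List String) (xs : List String) :
    addStrips sn (xs.filter hgB) = addStripsAll sn xs := by
  induction xs generalizing sn with
  | nil => rfl
  | cons a xs ih =>
    by_cases hg : hgB a
    · simp only [addStrips, addStripsAll, List.filter_cons, hg, if_pos, List.foldl_cons] at *
      exact ih _
    · have hg' : hgB a = false := by simpa using hg
      simp only [addStrips, addStripsAll, List.filter_cons, List.foldl_cons, hg',
        Bool.false_eq_true, if_false] at *
      exact ih sn

theorem ddRow_eq_filter (σ : List String) (acc₀ sn : List String) :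
    σ.foldl (fun acc a => if acc.contains (sgS a) then acc else acc ++ [sgS a])
      (acc₀ ++ sn.filter (fun s => !(acc₀.contains s)))
    = acc₀ ++ (addStrips sn σ).filter (fun s => !(acc₀.contains s)) := by
  induction σ generalizing sn with
  | nil => rfl
  | cons a σ ih =>
    simp only [List.foldl_cons, addStrips, List.foldl_cons] at *
    by_cases hsn : sn.contains (sgS a) <;> by_cases hacc : acc₀.contains (sgS a)
    · rw [if_pos (by simp_all), if_pos hsn]; exact ih sn
    · rw [if_pos (by simp_all), if_pos hsn]; exact ih sn
    · rw [if_pos (by simp [List.contains_iff_mem.mp hacc]), if_neg hsn]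
      have h3 : (sn ++ [sgS a]).filter (fun s => !(acc₀.contains s))
          = sn.filter (fun s => !(acc₀.contains s)) := by
        have hm : sgS a ∈ acc₀ := by simpa using hacc
        simp [List.filter_append, hm]
      have := ih (sn ++ [sgS a])
      rw [h3] at this
      exact this
    · rw [if_neg (by simp_all), if_neg hsn]
      have heq : acc₀ ++ (sn ++ [sgS a]).filter (fun s => !(acc₀.contains s))
           = (acc₀ ++ sn.filter (fun s => !(acc₀.contains s))) ++ [sgS a] := by
        have hm : sgS a ∉ acc₀ := by simpa using hacc
        simp [List.filter_append, hm]
      rw [← heq]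
      exact ih (sn ++ [sgS a])

-- ---- A-side characterisation ----
-- loop 1: copy the timepoint's own atoms, collecting raw G-atoms
theorem aLoop1 (t : Int) (xs : List String)
    (done rest : List (Int × List String)) (row : List String) (g : List String)
    (h : ∀ p ∈ done, p.1 ≠ t) (h' : ∀ p ∈ rest, p.1 ≠ t) :
    xs.foldl
      (fun (st : PySem.Dict Int (List String) × List String) atom =>
        if !(PySem.Str.isIn "G" atom) then
          (st.1.modify t [] (fun row => row ++ [atom]), st.2)
        else
          (st.1.modify t [] (fun row => row ++ [PySem.Str.stripChars atom "G"]),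
           st.2 ++ [atom]))
      (PySem.Dict.mk (done ++ (t, row) :: rest), g)
    = (PySem.Dict.mk (done ++ (t, row ++ xs.map ownify) :: rest), g ++ xs.filter hgB) := by
  induction xs generalizing row g with
  | nil => simp
  | cons a xs ih =>
    simp only [List.foldl_cons, List.map_cons, List.filter_cons]
    by_cases hg : hgB a
    · have hg' : PySem.Str.isIn "G" a = true := hg
      have hown : ownify a = sgS a := by unfold ownify; simp [hg]
      rw [if_neg (by simp only [hg', Bool.not_true, Bool.false_eq_true]; exact fun h => h.elim)]
      rw [dict_modify_split done rest t row _ h h']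
      rw [ih (row ++ [PySem.Str.stripChars a "G"]) (g ++ [a])]
      simp [hown, sgS, hg]
    · have hg' : PySem.Str.isIn "G" a = false := by simpa [hgB] using hg
      have hown : ownify a = a := by unfold ownify; simp [hg]
      have hgf : hgB a = false := by simpa using hg
      rw [if_pos (by simp only [hg', Bool.not_false])]
      rw [dict_modify_split done rest t row _ h h']
      rw [ih (row ++ [a]) g]
      simp [hown, hgf]

theorem aLoop2 (t : Int) (σ : List String)
    (done rest : List (Int × List String)) (row : List String)
    (h : ∀ p ∈ done, p.1 ≠ t) (h' : ∀ p ∈ rest, p.1 ≠ t) :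
    σ.foldl
      (fun rep atom =>
        if (rep.getD t []).contains (PySem.Str.stripChars atom "G") then rep
        else rep.modify t [] (fun row => row ++ [PySem.Str.stripChars atom "G"]))
      (PySem.Dict.mk (done ++ (t, row) :: rest))
    = PySem.Dict.mk (done ++
        (t, σ.foldl (fun acc a => if acc.contains (sgS a) then acc else acc ++ [sgS a]) row)
        :: rest) := by
  induction σ generalizing row with
  | nil => rfl
  | cons a σ ih =>
    simp only [List.foldl_cons]
    rw [dict_getD_split done rest t row h]
    by_cases hc : row.contains (PySem.Str.stripChars a "G")
    · rw [if_pos hc, if_pos (by simpa [sgS] using hc)]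
      exact ih row
    · rw [if_neg hc, if_neg (by simpa [sgS] using hc)]
      rw [dict_modify_split done rest t row _ h h']
      exact ih (row ++ [PySem.Str.stripChars a "G"])

-- A's main loop produces the canonical rows
theorem aMain (tr : List (Int × List String)) (l : List Int)
    (done : List (Int × List String)) (g : List String)
    (hnd : l.Nodup) (hfresh : ∀ t ∈ l, ∀ p ∈ done, p.1 ≠ t) :
    l.foldl
      (fun (st : PySem.Dict Int (List String) × List String) timepoint =>
        if (PySem.Dict.mk tr).contains timepoint then
          let st1 := (((PySem.Dict.mk tr).get? timepoint).getD []).foldl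
            (fun (st : PySem.Dict Int (List String) × List String) atom =>
              if !(PySem.Str.isIn "G" atom) then
                (st.1.modify timepoint [] (fun row => row ++ [atom]), st.2)
              else
                (st.1.modify timepoint [] (fun row => row ++ [PySem.Str.stripChars atom "G"]),
                 st.2 ++ [atom])) st
          let rep2 := st1.2.foldl
            (fun rep atom =>
              if (rep.getD timepoint []).contains (PySem.Str.stripChars atom "G") then rep
              else rep.modify timepoint [] (fun row => row ++ [PySem.Str.stripChars atom "G"]))
            st1.1
          (rep2, st1.2)
        else st)
      (PySem.Dict.mk (done ++ l.map (fun t => (t, ([] : List String)))), g)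
    = (PySem.Dict.mk (done ++ canon tr (addStrips [] g) l),
       l.foldl (fun g t => if inTr tr t then g ++ (atomsOf tr t).filter hgB else g) g) := by
  induction l generalizing done g with
  | nil => simp [canon]
  | cons t ts ih =>
    have hnd' : ts.Nodup := (List.nodup_cons.mp hnd).2
    have htn : t ∉ ts := (List.nodup_cons.mp hnd).1
    have hdone : ∀ p ∈ done, p.1 ≠ t := fun p hp => hfresh t (by simp) p hp
    have hrest : ∀ p ∈ ts.map (fun t => (t, ([] : List String))), p.1 ≠ t := by
      intro p hp
      obtain ⟨u, hu, rfl⟩ := List.mem_map.mp hp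
      simpa using fun e => htn (by rw [e] at hu; exact hu)
    simp only [List.map_cons, List.foldl_cons]
    by_cases hin : inTr tr t
    · have hct : (PySem.Dict.mk tr).contains t = true := hin
      rw [if_pos hct]
      simp only [aLoop1 t _ done (ts.map (fun t => (t, ([] : List String)))) [] g hdone hrest,
        List.nil_append]
      rw [aLoop2 t _ done (ts.map (fun t => (t, ([] : List String)))) _ hdone hrest]
      have hdd := ddRow_eq_filter (g ++ (((PySem.Dict.mk tr).get? t).getD []).filter hgB)
        ((((PySem.Dict.mk tr).get? t).getD []).map ownify) []
      simp only [List.filter_nil, List.append_nil] at hdd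
      rw [hdd]
      have hsn : addStrips []
          (g ++ (((PySem.Dict.mk tr).get? t).getD []).filter hgB)
          = addStripsAll (addStrips [] g) (atomsOf tr t) := by
        rw [addStrips, List.foldl_append, ← addStrips, ← addStrips, addStrips_filter]
        rfl
      rw [hsn]
      have hrow : ((((PySem.Dict.mk tr).get? t).getD []).map ownify) = ownRow tr t := rfl
      rw [hrow]
      have := ih (done ++ [(t, ownRow tr t ++
          (addStripsAll (addStrips [] g) (atomsOf tr t)).filter
            (fun s => !((ownRow tr t).contains s)))])
          (g ++ (atomsOf tr t).filter hgB) hnd'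
          (by intro u hu p hp
              rcases List.mem_append.mp hp with hp | hp
              · exact hfresh u (by simp [hu]) p hp
              · have hpt : p.1 = t := by rw [List.mem_singleton.mp hp]
                rw [hpt]
                exact fun e => htn (by rw [e]; exact hu))
      simp only [List.append_assoc, List.cons_append, List.nil_append] at this ⊢
      rw [show (atomsOf tr t).filter hgB = (((PySem.Dict.mk tr).get? t).getD []).filter hgB from rfl] at this
      rw [this]
      have hsn2 : addStrips [] (g ++ (((PySem.Dict.mk tr).get? t).getD []).filter hgB)
          = addStripsAll (addStrips [] g) (atomsOf tr t) := hsn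
      rw [hsn2]
      simp only [canon, hin, if_pos]
      simp only [atomsOf]
    · have hct : (PySem.Dict.mk tr).contains t = false := Bool.eq_false_iff.mpr hin
      rw [if_neg (by rw [hct]; exact Bool.false_ne_true)]
      have := ih (done ++ [(t, [])]) g hnd'
        (by intro u hu p hp
            rcases List.mem_append.mp hp with hp | hp
            · exact hfresh u (by simp [hu]) p hp
            · have hpt : p.1 = t := by rw [List.mem_singleton.mp hp]
              rw [hpt]
              exact fun e => htn (by rw [e]; exact hu))
      simp only [List.append_assoc, List.cons_append, List.nil_append] at this ⊢
      rw [this]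
      have hinf : inTr tr t = false := hct
      simp only [canon, hinf, Bool.false_eq_true, if_false]

-- ---- B-side characterisation ----
def firstStep (t : Int) (f : PySem.Dict String Int) (a : String) : PySem.Dict String Int :=
  if PySem.Str.isIn "G" a then
    if f.contains (PySem.Str.stripChars a "G") then f
    else f.insert (PySem.Str.stripChars a "G") t
  else f

def bStep (tr : List (Int × List String))
    (bf : PySem.Dict Int (List String) × PySem.Dict String Int) (t : Int) :
    PySem.Dict Int (List String) × PySem.Dict String Int :=
  if (PySem.Dict.mk tr).contains t then
    (bf.1.insert t (((PySem.Dict.mk tr).get? t).getD [] |>.map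
        (fun a => if PySem.Str.isIn "G" a then PySem.Str.stripChars a "G" else a)),
     (((PySem.Dict.mk tr).get? t).getD []).foldl (firstStep t) bf.2)
  else (bf.1.insert t [], bf.2)

theorem dict_contains_eq_keys' (l : List (String × Int)) (k : String) :
    (PySem.Dict.mk l).contains k = (l.map Prod.fst).contains k := by
  simp [PySem.Dict.contains, List.any_eq, List.contains_eq_mem]

theorem firstFold_keys (t : Int) (xs : List String) (f : PySem.Dict String Int) :
    ((xs.foldl (firstStep t) f).items).map Prod.fst = addStripsAll (f.items.map Prod.fst) xs := by
  induction xs generalizing f with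
  | nil => rfl
  | cons a xs ih =>
    simp only [List.foldl_cons, firstStep, addStripsAll] at *
    by_cases hg : hgB a
    · have hg' : PySem.Str.isIn "G" a = true := hg
      rw [if_pos hg']
      by_cases hc : (f.items.map Prod.fst).contains (sgS a)
      · have : f.contains (PySem.Str.stripChars a "G") = true := by
          rw [dict_contains_eq_keys']; exact hc
        rw [if_pos this]
        have := ih f
        rw [this, ← addStripsAll]
        rw [show (if hgB a = true then
            (if (f.items.map Prod.fst).contains (sgS a) = true then f.items.map Prod.fst
              else f.items.map Prod.fst ++ [sgS a]) else f.items.map Prod.fst) = f.items.map Prod.fst from by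
          rw [if_pos hg, if_pos hc]]
        rfl
      · have hcf : f.contains (PySem.Str.stripChars a "G") = false := by
          rw [dict_contains_eq_keys']; exact Bool.eq_false_iff.mpr hc
        rw [if_neg (by rw [hcf]; exact Bool.false_ne_true)]
        rw [dict_insert_fresh f.items _ _ (by cases f; exact hcf)]
        have := ih (PySem.Dict.mk (f.items ++ [(PySem.Str.stripChars a "G", t)]))
        rw [this]
        rw [show ((PySem.Dict.mk (f.items ++ [(PySem.Str.stripChars a "G", t)])).items).map Prod.fst
            = f.items.map Prod.fst ++ [sgS a] from by simp [sgS]]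
        rw [show (if hgB a = true then
            (if (f.items.map Prod.fst).contains (sgS a) = true then f.items.map Prod.fst
              else f.items.map Prod.fst ++ [sgS a]) else f.items.map Prod.fst)
            = f.items.map Prod.fst ++ [sgS a] from by
          rw [if_pos hg, if_neg (by rw [Bool.eq_false_iff.mpr hc]; exact Bool.false_ne_true)]]
    · have hg' : PySem.Str.isIn "G" a = false := by simpa [hgB] using hg
      rw [if_neg (by rw [hg']; exact Bool.false_ne_true)]
      rw [ih f]
      rw [show (if hgB a = true then
          (if (f.items.map Prod.fst).contains (sgS a) = true then f.items.map Prod.fst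
            else f.items.map Prod.fst ++ [sgS a]) else f.items.map Prod.fst) = f.items.map Prod.fst from by
        rw [if_neg (by rw [show hgB a = false from by simpa using hg]; exact Bool.false_ne_true)]]

theorem firstFold_struct (t : Int) (xs : List String) (f : PySem.Dict String Int) :
    ∃ Δ, (xs.foldl (firstStep t) f).items = f.items ++ Δ ∧ ∀ q ∈ Δ, q.2 = t := by
  induction xs generalizing f with
  | nil => exact ⟨[], by simp, by simp⟩
  | cons a xs ih =>
    simp only [List.foldl_cons, firstStep]
    by_cases hg : PySem.Str.isIn "G" a
    · rw [if_pos hg]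
      by_cases hc : f.contains (PySem.Str.stripChars a "G")
      · rw [if_pos hc]; exact ih f
      · rw [if_neg hc]
        rw [dict_insert_fresh f.items _ _ (by cases f; exact Bool.eq_false_iff.mpr hc)]
        obtain ⟨Δ, hΔ, hall⟩ := ih (PySem.Dict.mk (f.items ++ [(PySem.Str.stripChars a "G", t)]))
        refine ⟨[(PySem.Str.stripChars a "G", t)] ++ Δ, ?_, ?_⟩
        · rw [hΔ]; simp
        · intro q hq
          rcases List.mem_append.mp hq with hq | hq
          · simpa using List.mem_singleton.mp hq ▸ rfl
          · exact hall q hq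
    · rw [if_neg hg]; exact ih f

theorem bPass1 (tr : List (Int × List String)) (l : List Int)
    (items0 : List (Int × List String)) (f0 : PySem.Dict String Int)
    (hnd : l.Nodup) (hfresh : ∀ t ∈ l, (items0.map Prod.fst).contains t = false) :
    l.foldl (bStep tr) (PySem.Dict.mk items0, f0)
    = (PySem.Dict.mk (items0 ++ l.map
        (fun t => (t, if inTr tr t then ownRow tr t else []))),
       l.foldl (fun f t => if inTr tr t then (atomsOf tr t).foldl (firstStep t) f else f) f0) := by
  induction l generalizing items0 f0 with
  | nil => simp
  | cons t ts ih =>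
    have hnd' : ts.Nodup := (List.nodup_cons.mp hnd).2
    have htn : t ∉ ts := (List.nodup_cons.mp hnd).1
    have hfr : ((items0.map Prod.fst).contains t) = false := hfresh t (by simp)
    have hfr' : (PySem.Dict.mk items0).contains t = false := by
      rw [dict_contains_eq_keys]; exact hfr
    have hfresh' : ∀ v, ∀ u ∈ ts, (((items0 ++ [(t, v)]).map Prod.fst).contains u) = false := by
      intro v u hu
      simp only [List.map_append, List.contains_append, List.map_cons, List.map_nil]
      rw [Bool.or_eq_false_iff]
      constructor
      · exact hfresh u (by simp [hu])
      · simp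
        exact fun e => htn (by rw [← e]; exact hu)
    simp only [List.foldl_cons, List.map_cons]
    by_cases hin : inTr tr t
    · rw [show bStep tr (PySem.Dict.mk items0, f0) t
          = ((PySem.Dict.mk items0).insert t (ownRow tr t),
             (atomsOf tr t).foldl (firstStep t) f0) from by
        unfold bStep; rw [if_pos (show (PySem.Dict.mk tr).contains t = true from hin)]; rfl]
      rw [dict_insert_fresh items0 t _ hfr']
      rw [ih (items0 ++ [(t, ownRow tr t)]) _ hnd' (hfresh' _)]
      rw [hin]
      simp only [if_true, List.append_assoc, List.singleton_append]
    · have hinf : inTr tr t = false := Bool.eq_false_iff.mpr hin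
      rw [show bStep tr (PySem.Dict.mk items0, f0) t
          = ((PySem.Dict.mk items0).insert t [], f0) from by
        unfold bStep; rw [if_neg (by rw [show (PySem.Dict.mk tr).contains t = false from hinf]; exact Bool.false_ne_true)]]
      rw [dict_insert_fresh items0 t _ hfr']
      rw [ih (items0 ++ [(t, [])]) f0 hnd' (hfresh' _)]
      rw [hinf]
      simp only [Bool.false_eq_true, if_false, List.append_assoc, List.singleton_append]

def snOf (tr : List (Int × List String)) (sn : List String) (l : List Int) : List String :=
  l.foldl (fun sn t => if inTr tr t then addStripsAll sn (atomsOf tr t) else sn) sn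

theorem firstOf_keys (tr : List (Int × List String)) (l : List Int)
    (f : PySem.Dict String Int) (sn : List String) (h : f.items.map Prod.fst = sn) :
    ((l.foldl (fun f t => if inTr tr t then (atomsOf tr t).foldl (firstStep t) f else f) f).items).map
      Prod.fst = snOf tr sn l := by
  induction l generalizing f sn with
  | nil => simpa [snOf] using h
  | cons t ts ih =>
    simp only [List.foldl_cons, snOf] at *
    by_cases hin : inTr tr t
    · rw [hin]
      simp only [if_true]
      exact ih _ _ (by rw [firstFold_keys, h])
    · have hinf : inTr tr t = false := Bool.eq_false_iff.mpr hin
      rw [hinf]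
      simp only [Bool.false_eq_true, if_false]
      exact ih f sn h

theorem firstOf_struct (tr : List (Int × List String)) (l : List Int)
    (f : PySem.Dict String Int) :
    ∃ Δ, (l.foldl (fun f t => if inTr tr t then (atomsOf tr t).foldl (firstStep t) f else f)
        f).items = f.items ++ Δ ∧ ∀ q ∈ Δ, q.2 ∈ l := by
  induction l generalizing f with
  | nil => exact ⟨[], by simp, by simp⟩
  | cons t ts ih =>
    simp only [List.foldl_cons]
    by_cases hin : inTr tr t
    · rw [hin]
      simp only [if_true]
      obtain ⟨Δ₁, hΔ₁, h1⟩ := firstFold_struct t (atomsOf tr t) f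
      obtain ⟨Δ₂, hΔ₂, h2⟩ := ih ((atomsOf tr t).foldl (firstStep t) f)
      refine ⟨Δ₁ ++ Δ₂, by rw [hΔ₂, hΔ₁, List.append_assoc], ?_⟩
      intro q hq
      rcases List.mem_append.mp hq with hq | hq
      · simp [h1 q hq]
      · simp [h2 q hq]
    · have hinf : inTr tr t = false := Bool.eq_false_iff.mpr hin
      rw [hinf]
      simp only [Bool.false_eq_true, if_false]
      obtain ⟨Δ, hΔ, hall⟩ := ih f
      exact ⟨Δ, hΔ, fun q hq => by simp [hall q hq]⟩

def firstOf (tr : List (Int × List String)) (l : List Int) : PySem.Dict String Int :=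
  l.foldl (fun f t => if inTr tr t then (atomsOf tr t).foldl (firstStep t) f else f)
    PySem.Dict.empty

-- filtering the full first dict at timepoint t sees exactly the prefix up to t
theorem firstOf_filter (tr : List (Int × List String)) (n t : Int)
    (ht : t ∈ PySem.List.pyRange 0 n 1) :
    ((firstOf tr (PySem.List.pyRange 0 n 1)).items.filter
      (fun q => decide (q.2 ≤ t))).map Prod.fst
    = snOf tr [] (PySem.List.pyRange 0 (t + 1) 1) := by
  obtain ⟨h0, hn⟩ := PySem.List.mem_pyRange_one.mp ht
  have hsplit : PySem.List.pyRange 0 n 1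
      = PySem.List.pyRange 0 (t + 1) 1 ++ PySem.List.pyRange (t + 1) n 1 :=
    PySem.List.pyRange_one_append 0 (t + 1) n (by omega) (by omega)
  unfold firstOf
  rw [hsplit, List.foldl_append]
  set G := (PySem.List.pyRange 0 (t + 1) 1).foldl
    (fun f u => if inTr tr u then (atomsOf tr u).foldl (firstStep u) f else f)
    PySem.Dict.empty with hG
  obtain ⟨Δ, hΔ, hΔt⟩ := firstOf_struct tr (PySem.List.pyRange (t + 1) n 1) G
  rw [hΔ, List.filter_append]
  have hGt : ∀ q ∈ G.items, q.2 ≤ t := by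
    intro q hq
    obtain ⟨Δ₀, hΔ₀, h₀⟩ := firstOf_struct tr (PySem.List.pyRange 0 (t + 1) 1)
      (PySem.Dict.empty : PySem.Dict String Int)
    rw [← hG] at hΔ₀
    rw [hΔ₀] at hq
    rcases List.mem_append.mp hq with hq | hq
    · simp [PySem.Dict.empty] at hq
    · have := PySem.List.mem_pyRange_one.mp (h₀ q hq)
      omega
  have h1 : G.items.filter (fun q => decide (q.2 ≤ t)) = G.items :=
    List.filter_eq_self.mpr (fun q hq => by simpa using hGt q hq)
  have h2 : Δ.filter (fun q => decide (q.2 ≤ t)) = [] :=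
    List.filter_eq_nil_iff.mpr (fun q hq => by
      have := PySem.List.mem_pyRange_one.mp (hΔt q hq)
      simp; omega)
  rw [h1, h2, List.append_nil]
  exact firstOf_keys tr _ _ [] (by simp [PySem.Dict.empty])

theorem filter_and_map_fst (l : List (String × Int)) (t : Int) (p : String → Bool) :
    ((l.filter (fun q => decide (q.2 ≤ t) && !(p q.1))).map Prod.fst)
    = ((l.filter (fun q => decide (q.2 ≤ t))).map Prod.fst).filter (fun s => !(p s)) := by
  induction l with
  | nil => rfl
  | cons q l ih =>
    by_cases h1 : decide (q.2 ≤ t)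
    · by_cases h2 : p q.1
      · simp [h1, h2, ih]
      · simp [h1, h2, ih]
    · simp at h1
      simp [h1, ih]

theorem bPass2 (tr : List (Int × List String)) (n a : Int) (h0 : 0 ≤ a)
    (F : PySem.Dict String Int) (hF : F = firstOf tr (PySem.List.pyRange 0 n 1)) :
    (PySem.List.pyRange a n 1).map
      (fun t => (t, if inTr tr t then
          ownRow tr t ++ (F.items.filter
            (fun q => decide (q.2 ≤ t) && !((ownRow tr t).contains q.1))).map (fun q => q.1)
        else []))
    = canon tr (snOf tr [] (PySem.List.pyRange 0 a 1)) (PySem.List.pyRange a n 1) := by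
  suffices H : ∀ k (a : Int), 0 ≤ a → (n - a).toNat = k →
      (PySem.List.pyRange a n 1).map
        (fun t => (t, if inTr tr t then
            ownRow tr t ++ (F.items.filter
              (fun q => decide (q.2 ≤ t) && !((ownRow tr t).contains q.1))).map (fun q => q.1)
          else []))
      = canon tr (snOf tr [] (PySem.List.pyRange 0 a 1)) (PySem.List.pyRange a n 1) by
    exact H _ a h0 rfl
  intro k
  induction k with
  | zero =>
    intro a ha hk
    rw [PySem.List.pyRange_one_eq_nil (by omega)]
    rfl
  | succ k ih =>
    intro a ha hk
    have hlt : a < n := by omega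
    rw [PySem.List.pyRange_one_cons hlt]
    have hsn : snOf tr [] (PySem.List.pyRange 0 (a + 1) 1)
        = (if inTr tr a then addStripsAll (snOf tr [] (PySem.List.pyRange 0 a 1)) (atomsOf tr a)
           else snOf tr [] (PySem.List.pyRange 0 a 1)) := by
      unfold snOf
      rw [PySem.List.pyRange_one_succ_right ha, List.foldl_append]
      by_cases h : inTr tr a
      · simp only [List.foldl_cons, List.foldl_nil, h, if_true]
      · have h' : inTr tr a = false := Bool.eq_false_iff.mpr h
        simp only [List.foldl_cons, List.foldl_nil, h', Bool.false_eq_true, if_false]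
    have htail := ih (a + 1) (by omega) (by omega)
    rw [List.map_cons, htail]
    by_cases hin : inTr tr a
    · have hfa : ((F.items.filter (fun q => decide (q.2 ≤ a))).map Prod.fst)
          = snOf tr [] (PySem.List.pyRange 0 (a + 1) 1) := by
        rw [hF]
        exact firstOf_filter tr n a (PySem.List.mem_pyRange_one.mpr ⟨ha, hlt⟩)
      have hrow : (F.items.filter
            (fun q => decide (q.2 ≤ a) && !((ownRow tr a).contains q.1))).map (fun q => q.1)
          = (addStripsAll (snOf tr [] (PySem.List.pyRange 0 a 1)) (atomsOf tr a)).filter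
              (fun s => !((ownRow tr a).contains s)) := by
        rw [filter_and_map_fst F.items a (fun s => (ownRow tr a).contains s)]
        rw [hfa, hsn, hin]
        simp
      rw [show canon tr (snOf tr [] (PySem.List.pyRange 0 a 1))
            (a :: PySem.List.pyRange (a + 1) n 1)
          = (a, ownRow tr a ++ (addStripsAll (snOf tr [] (PySem.List.pyRange 0 a 1))
              (atomsOf tr a)).filter (fun s => !((ownRow tr a).contains s)))
            :: canon tr (addStripsAll (snOf tr [] (PySem.List.pyRange 0 a 1)) (atomsOf tr a))
                (PySem.List.pyRange (a + 1) n 1) from by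
        simp only [canon, hin, if_pos]]
      rw [hin]
      simp only [if_true, hrow]
      rw [show snOf tr [] (PySem.List.pyRange 0 (a + 1) 1)
          = addStripsAll (snOf tr [] (PySem.List.pyRange 0 a 1)) (atomsOf tr a) from by
        rw [hsn, hin]; simp]
    · have hinf : inTr tr a = false := Bool.eq_false_iff.mpr hin
      rw [hinf]
      simp only [Bool.false_eq_true, if_false]
      rw [show canon tr (snOf tr [] (PySem.List.pyRange 0 a 1))
            (a :: PySem.List.pyRange (a + 1) n 1)
          = (a, []) :: canon tr (snOf tr [] (PySem.List.pyRange 0 a 1))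
              (PySem.List.pyRange (a + 1) n 1) from by
        simp only [canon, hinf, Bool.false_eq_true, if_false]]
      rw [show snOf tr [] (PySem.List.pyRange 0 (a + 1) 1)
          = snOf tr [] (PySem.List.pyRange 0 a 1) from by rw [hsn, hinf]; simp]

theorem bResult (tr : List (Int × List String)) (rows : List (Int × List String))
    (F : PySem.Dict String Int) (hnd : (rows.map Prod.fst).Nodup) :
    (rows.foldl
      (fun (res : PySem.Dict Int (List String)) p =>
        if (PySem.Dict.mk tr).contains p.1 then
          res.insert p.1
            (p.2 ++ (F.items.filter
              (fun q => decide (q.2 ≤ p.1) && !(p.2.contains q.1))).map (fun q => q.1))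
        else res.insert p.1 p.2)
      PySem.Dict.empty).items
    = rows.map (fun p => (p.1, if (PySem.Dict.mk tr).contains p.1 then
          p.2 ++ (F.items.filter
            (fun q => decide (q.2 ≤ p.1) && !(p.2.contains q.1))).map (fun q => q.1)
        else p.2)) := by
  have hstep : (fun (res : PySem.Dict Int (List String)) (p : Int × List String) =>
        if (PySem.Dict.mk tr).contains p.1 then
          res.insert p.1
            (p.2 ++ (F.items.filter
              (fun q => decide (q.2 ≤ p.1) && !(p.2.contains q.1))).map (fun q => q.1))
        else res.insert p.1 p.2)
      = (fun (res : PySem.Dict Int (List String)) (p : Int × List String) =>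
          res.insert p.1 (if (PySem.Dict.mk tr).contains p.1 then
            p.2 ++ (F.items.filter
              (fun q => decide (q.2 ≤ p.1) && !(p.2.contains q.1))).map (fun q => q.1)
          else p.2)) := by
    funext res p
    by_cases h : (PySem.Dict.mk tr).contains p.1
    · rw [if_pos h, if_pos h]
    · rw [if_neg h, if_neg h]
  rw [hstep]
  rw [PySem.Dict.items_foldl_insert_fresh rows Prod.fst _ PySem.Dict.empty
    (fun a _ => by simp [PySem.Dict.contains, PySem.Dict.empty]) hnd]
  simp [PySem.Dict.empty]

theorem repZero (n : Int) :
    ((PySem.List.pyRange 0 n 1).foldl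
      (fun (d : PySem.Dict Int (List String)) t => d.insert t []) PySem.Dict.empty).items
    = (PySem.List.pyRange 0 n 1).map (fun t => (t, ([] : List String))) := by
  have := PySem.Dict.items_foldl_insert_fresh (PySem.List.pyRange 0 n 1)
    (fun t => t) (fun _ => ([] : List String)) PySem.Dict.empty
    (fun a _ => by simp [PySem.Dict.contains, PySem.Dict.empty])
    (by simpa using PySem.List.nodup_pyRange_one 0 n)
  simpa [PySem.Dict.empty] using this

theorem bPass1_lit (tr : List (Int × List String)) (l : List Int)
    (items0 : List (Int × List String)) (f0 : PySem.Dict String Int)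
    (hnd : l.Nodup) (hfresh : ∀ t ∈ l, (items0.map Prod.fst).contains t = false) :
    l.foldl
      (fun (bf : PySem.Dict Int (List String) × PySem.Dict String Int) t =>
        if (PySem.Dict.mk tr).contains t then
          let row := (((PySem.Dict.mk tr).get? t).getD []).map
            (fun a => if PySem.Str.isIn "G" a then PySem.Str.stripChars a "G" else a)
          let first := (((PySem.Dict.mk tr).get? t).getD []).foldl
            (fun f a =>
              if PySem.Str.isIn "G" a then
                if f.contains (PySem.Str.stripChars a "G") then f
                else f.insert (PySem.Str.stripChars a "G") t
              else f) bf.2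
          (bf.1.insert t row, first)
        else (bf.1.insert t [], bf.2))
      (PySem.Dict.mk items0, f0)
    = (PySem.Dict.mk (items0 ++ l.map
        (fun t => (t, if inTr tr t then ownRow tr t else []))),
       l.foldl (fun f t => if inTr tr t then (atomsOf tr t).foldl (firstStep t) f else f) f0) :=
  bPass1 tr l items0 f0 hnd hfresh

theorem shortest_representation_spec : Claim_equal_shortest_representation := by
  intro my_trace my_period _
  unfold Spec_shortest_representation
  simp only [shortest_representation, shortest_representation_alt]
  -- name the range
  set n : Int := my_period.2 + 1 with hn
  -- A side: initial representation
  have hrep : ((PySem.List.pyRange 0 n 1).foldl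
      (fun (d : PySem.Dict Int (List String)) t => d.insert t []) PySem.Dict.empty)
      = PySem.Dict.mk ((PySem.List.pyRange 0 n 1).map (fun t => (t, ([] : List String)))) := by
    apply PySem.Dict.ext
    exact repZero n
  rw [hrep]
  have hkeys : (PySem.Dict.mk ((PySem.List.pyRange 0 n 1).map
      (fun t => (t, ([] : List String))))).keys = PySem.List.pyRange 0 n 1 := by
    show ((PySem.List.pyRange 0 n 1).map (fun t => (t, ([] : List String)))).map (fun x => x.1)
      = PySem.List.pyRange 0 n 1
    rw [List.map_map]
    exact (List.map_congr_left (fun a _ => rfl)).trans (List.map_id _)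
  rw [hkeys]
  have hnd := PySem.List.nodup_pyRange_one 0 n
  have ha := aMain my_trace (PySem.List.pyRange 0 n 1) [] [] hnd (by simp)
  simp only [List.nil_append] at ha
  rw [show addStrips ([] : List String) [] = [] from rfl] at ha
  rw [ha]
  -- B side: pass 1
  have hb := bPass1_lit my_trace (PySem.List.pyRange 0 n 1) [] PySem.Dict.empty hnd (by simp)
  simp only [List.nil_append] at hb
  rw [show PySem.Dict.mk ([] : List (Int × List String)) = PySem.Dict.empty from rfl] at hb
  rw [hb]
  -- B side: pass 2 fold into items map
  have hrows : ((PySem.List.pyRange 0 n 1).map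
      (fun t => (t, if inTr my_trace t then ownRow my_trace t else []))).map Prod.fst
      = PySem.List.pyRange 0 n 1 := by
    rw [List.map_map]
    exact (List.map_congr_left (fun a _ => rfl)).trans (List.map_id _)
  have hres := bResult my_trace
    ((PySem.List.pyRange 0 n 1).map (fun t => (t, if inTr my_trace t then ownRow my_trace t else [])))
    ((PySem.List.pyRange 0 n 1).foldl
      (fun f t => if inTr my_trace t then (atomsOf my_trace t).foldl (firstStep t) f else f)
      PySem.Dict.empty)
    (by rw [hrows]; exact hnd)
  rw [hres]
  -- rows map composed
  rw [List.map_map]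
  have hcomp : ((fun p : Int × List String => (p.1, if (PySem.Dict.mk my_trace).contains p.1 then
        p.2 ++ (((PySem.List.pyRange 0 n 1).foldl
          (fun f t => if inTr my_trace t then (atomsOf my_trace t).foldl (firstStep t) f else f)
          PySem.Dict.empty).items.filter
            (fun q => decide (q.2 ≤ p.1) && !(p.2.contains q.1))).map (fun q => q.1)
      else p.2)) ∘ (fun t => (t, if inTr my_trace t then ownRow my_trace t else [])))
      = (fun t => (t, if inTr my_trace t then
          ownRow my_trace t ++ (((firstOf my_trace (PySem.List.pyRange 0 n 1)).items.filter
            (fun q => decide (q.2 ≤ t) && !((ownRow my_trace t).contains q.1))).map (fun q => q.1))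
        else [])) := by
    funext t
    by_cases h : inTr my_trace t
    · simp only [Function.comp, h, if_true]
      rw [if_pos (show (PySem.Dict.mk my_trace).contains t = true from h)]
      rfl
    · have h' : inTr my_trace t = false := Bool.eq_false_iff.mpr h
      simp only [Function.comp, h', Bool.false_eq_true, if_false]
      rw [if_neg (by
        rw [show (PySem.Dict.mk my_trace).contains t = false from h']
        exact Bool.false_ne_true)]
  rw [hcomp]
  have hb2 := bPass2 my_trace n 0 le_rfl (firstOf my_trace (PySem.List.pyRange 0 n 1)) rfl
  rw [hb2]
  rw [show snOf my_trace [] (PySem.List.pyRange 0 0 1) = [] from by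
    rw [PySem.List.pyRange_one_eq_nil le_rfl]; rfl]
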